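-- pv_equiv track=rewrite | github.com/ayo-anu/ecommerce-backend | services/backend/apps/core/management/commands/audit_queries.py | find_similar_queries
-- ===== SOURCE A (Python) =====
-- def find_similar_queries(queries):
--     query_patterns = {}
--
--     for query in queries:
--         sql = query['sql']
--         normalized = sql.split('WHERE')[0] if 'WHERE' in sql else sql
--         normalized = normalized.split('LIMIT')[0] if 'LIMIT' in sql else normalized
--
--         if normalized in query_patterns:
--             query_patterns[normalized] += 1
--         else:
--             query_patterns[normalized] = 1
--
--     return {
--         pattern: count
--         for pattern, count in query_patterns.items()
--         if count > 1
--     }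
-- ===== SOURCE B (Python) =====
-- def _normalize(sql):
--     head = sql.split('WHERE')[0] if 'WHERE' in sql else sql
--     return head.split('LIMIT')[0] if 'LIMIT' in sql else head
--
--
-- def find_similar_queries(queries):
--     keys = [_normalize(q['sql']) for q in queries]
--     # sort-then-scan: equal patterns become adjacent runs; record each run's length
--     rest = sorted(keys)
--     counts = {}
--     while rest:
--         head = rest[0]
--         tail = rest[1:]
--         same = 0
--         while same < len(tail) and tail[same] == head:
--             same += 1
--         counts[head] = 1 + same
--         rest = tail[same:]
--     # emit in first-occurrence order, keeping only repeated patterns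
--     return {k: counts[k] for k in dict.fromkeys(keys) if counts[k] > 1}
-- ===== Notes on version B (the rewrite author's own statement) =====
-- stated objective: alternative
-- what changed: Replaces A's incremental hash tallying with sort-then-scan: the normalized keys are sorted so equal patterns are adjacent, run lengths are measured by a two-level scan over the sorted list, and the result is emitted as a comprehension over dict.fromkeys first occurrences filtered by count > 1.
import Mathlib
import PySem

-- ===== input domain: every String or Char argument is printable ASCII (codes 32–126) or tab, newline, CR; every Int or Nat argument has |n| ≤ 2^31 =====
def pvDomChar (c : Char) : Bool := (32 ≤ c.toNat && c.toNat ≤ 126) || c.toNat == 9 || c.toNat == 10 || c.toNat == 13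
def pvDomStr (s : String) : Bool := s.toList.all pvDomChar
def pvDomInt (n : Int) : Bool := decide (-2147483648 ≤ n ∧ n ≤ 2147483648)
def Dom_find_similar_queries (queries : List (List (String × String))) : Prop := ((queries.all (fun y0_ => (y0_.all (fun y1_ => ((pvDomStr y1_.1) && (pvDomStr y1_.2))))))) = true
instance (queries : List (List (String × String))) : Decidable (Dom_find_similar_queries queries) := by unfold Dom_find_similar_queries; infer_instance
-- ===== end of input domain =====

-- B replaces A's incremental hash tallying with sort-then-scan run-length counting plus first-occurrence emission (alternative algorithm, no speed claim).


-- ===== PORT A =====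
-- sql.split('WHERE')[0] if 'WHERE' in sql else sql, then .split('LIMIT')[0] if 'LIMIT' in sql
-- (the membership tests are on the ORIGINAL sql, exactly as in A; under 'isIn' the split list is
-- nonempty and headD "" is its element [0])
def find_similar_queries (queries : List (List (String × String))) : List (String × Int) :=
  let query_patterns : PySem.Dict String Int :=
    queries.foldl (fun d query =>
      let sql := ((PySem.Dict.mk query).get? "sql").getD ""   -- query['sql']; Pre_ makes the key present
      let normalized := if PySem.Str.isIn "WHERE" sql then ((PySem.Str.split? sql "WHERE").getD []).headD "" else sql
      let normalized := if PySem.Str.isIn "LIMIT" sql then ((PySem.Str.split? normalized "LIMIT").getD []).headD "" else normalized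
      if d.contains normalized then d.insert normalized (d.getD normalized 0 + 1)
      else d.insert normalized 1) PySem.Dict.empty
  query_patterns.items.filter (fun p => 1 < p.2)

-- ===== PORT B =====
def pvNormalize (sql : String) : String :=
  let head := if PySem.Str.isIn "WHERE" sql then ((PySem.Str.split? sql "WHERE").getD []).headD "" else sql
  if PySem.Str.isIn "LIMIT" sql then ((PySem.Str.split? head "LIMIT").getD []).headD "" else head

-- the outer while over 'rest': take the head, count the adjacent equal tail prefix
-- ('same' = tail.takeWhile length, the inner while), record the run, continue past it
def pvRuns : List String → PySem.Dict String Int → PySem.Dict String Int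
  | [], counts => counts
  | head :: tail, counts =>
    let same := (tail.takeWhile (· == head)).length
    pvRuns (tail.drop same) (counts.insert head (1 + (same : Int)))
termination_by rest _ => rest.length
decreasing_by simp

-- counts[k] is present for every k ∈ keys; .getD 0 reads it (comment: KeyError impossible here)
def find_similar_queries_alt (queries : List (List (String × String))) : List (String × Int) :=
  let keys := queries.map (fun q => pvNormalize (((PySem.Dict.mk q).get? "sql").getD ""))
  let counts := pvRuns (PySem.List.sorted keys (fun x => x) false) PySem.Dict.empty
  (PySem.List.dedup keys).filterMap (fun k =>
    if 1 < counts.getD k 0 then some (k, counts.getD k 0) else none)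

-- ===== PRECONDITION & SPEC =====
-- Pre_ excludes exactly the inputs where query['sql'] raises KeyError (in A and in B alike)
def Pre_find_similar_queries (queries : List (List (String × String))) : Prop :=
  ∀ q ∈ queries, (PySem.Dict.mk q).contains "sql" = true
instance (queries : List (List (String × String))) : Decidable (Pre_find_similar_queries queries) := by unfold Pre_find_similar_queries; infer_instance
def pvWitness_find_similar_queries : (List (List (String × String))) :=
  [[("sql", "SELECT * FROM t WHERE id = 1")], [("sql", "SELECT * FROM t WHERE id = 2")], [("sql", "SELECT 1")]]

def Spec_find_similar_queries (queries : List (List (String × String))) (out : List (String × Int)) : Prop := out = find_similar_queries_alt queries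
instance (queries : List (List (String × String))) (out : List (String × Int)) : Decidable (Spec_find_similar_queries queries out) := by unfold Spec_find_similar_queries; infer_instance

-- ===== CLAIM (what is proved, stated in full; the proofs are below) =====
def Claim_equal_find_similar_queries : Prop := ∀ (queries : List (List (String × String))), Dom_find_similar_queries queries → Pre_find_similar_queries queries → Spec_find_similar_queries queries (find_similar_queries queries)

-- ===== LEMMAS AND PROOFS =====

-- A's counting loop is Counter(keys)
theorem pvFoldA_eq_counter (ks : List String) :
    ks.foldl (fun d k => if d.contains k then d.insert k (d.getD k 0 + 1) else d.insert k 1)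
      PySem.Dict.empty = PySem.Dict.counter ks := by
  rw [← PySem.Dict.foldl_insert_getD_add_one_eq_counter]
  apply List.foldl_ext
  intro d k _
  by_cases h : d.contains k = true
  · simp [h]
  · simp [h, PySem.Dict.getD_of_not_contains d (0 : Int) (by simpa using h)]

-- drop-after-takeWhile is dropWhile (the run scan's two pointers, as lists)
theorem pvDropTake (xs : List String) (p : String → Bool) :
    xs.drop (xs.takeWhile p).length = xs.dropWhile p := by
  induction xs with
  | nil => simp
  | cons y ys ih => by_cases h : p y <;> simp [List.takeWhile, List.dropWhile, h, ih]

-- in a ≤-sorted list, nothing equal to the head survives past the head run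
theorem pvNotMemDrop (x : String) : ∀ (xs : List String),
    (x :: xs).Pairwise (· ≤ ·) → x ∉ xs.dropWhile (· == x) := by
  intro xs
  induction xs with
  | nil => simp
  | cons y ys ih =>
    intro hp
    by_cases hyx : (y == x) = true
    · have hy : y = x := by simpa using hyx
      subst hy
      have : (y :: ys).Pairwise (· ≤ ·) := by
        rcases List.pairwise_cons.mp hp with ⟨h1, h2⟩
        rcases List.pairwise_cons.mp h2 with ⟨h3, h4⟩
        exact List.pairwise_cons.mpr ⟨h3, h4⟩
      simpa [List.dropWhile, hyx] using ih this
    · simp only [List.dropWhile, hyx]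
      rcases List.pairwise_cons.mp hp with ⟨h1, h2⟩
      rcases List.pairwise_cons.mp h2 with ⟨h3, _⟩
      intro hmem
      rcases List.mem_cons.mp hmem with h | h
      · exact hyx (by simp [h])
      · have hxy : x ≤ y := h1 y (by simp)
        have hyx' : y ≤ x := h3 x h
        exact hyx (by simp [le_antisymm hyx' hxy])

-- the run scan computes the multiplicity of every key of the sorted list
theorem pvRuns_getD : ∀ (n : Nat) (s : List String), s.length ≤ n → s.Pairwise (· ≤ ·) →
    ∀ (d : PySem.Dict String Int) (k : String),
    (pvRuns s d).getD k 0 = if k ∈ s then (s.count k : Int) else d.getD k 0 := by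
  intro n
  induction n with
  | zero =>
    intro s hs _ d k
    have : s = [] := List.eq_nil_of_length_eq_zero (Nat.le_zero.mp hs)
    subst this; simp [pvRuns]
  | succ n ih =>
    intro s hs hp d k
    match s with
    | [] => simp [pvRuns]
    | x :: xs =>
      have hstep : pvRuns (x :: xs) d
          = pvRuns (xs.dropWhile (· == x))
              (d.insert x (1 + ((xs.takeWhile (· == x)).length : Int))) := by
        rw [pvRuns, pvDropTake]
      have hlen : (xs.dropWhile (· == x)).length ≤ n :=
        le_trans (List.length_dropWhile_le _ _) (Nat.succ_le_succ_iff.mp hs)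
      have hsub : (xs.dropWhile (· == x)).Pairwise (· ≤ ·) :=
        (List.pairwise_cons.mp hp).2.sublist (List.dropWhile_sublist _)
      have hsplit : xs = xs.takeWhile (· == x) ++ xs.dropWhile (· == x) :=
        (List.takeWhile_append_dropWhile).symm
      have htake : ∀ a ∈ xs.takeWhile (· == x), a = x := by
        intro a ha
        simpa using List.mem_takeWhile_imp ha
      rw [hstep, ih _ hlen hsub]
      by_cases hk : k = x
      · subst hk
        have hnot : k ∉ xs.dropWhile (· == k) := pvNotMemDrop k xs hp
        have hcnt : ((k :: xs).count k : Int)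
            = 1 + ((xs.takeWhile (· == k)).length : Int) := by
          rw [List.count_cons_self]
          conv_lhs => rw [hsplit]
          rw [List.count_append, List.count_eq_zero.mpr hnot,
            List.count_eq_length.mpr (fun b hb => (htake b hb).symm)]
          push_cast; ring
        rw [if_neg hnot, PySem.Dict.getD_insert, if_pos rfl, if_pos (by simp), hcnt]
      · have hmem : (k ∈ xs.dropWhile (· == x)) = (k ∈ x :: xs) := by
          apply propext
          constructor
          · intro h; exact List.mem_cons_of_mem _ (hsplit ▸ List.mem_append_right _ h)
          · intro h
            rcases List.mem_cons.mp h with h | h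
            · exact absurd h hk
            · rw [hsplit] at h
              rcases List.mem_append.mp h with h | h
              · exact absurd (htake k h) hk
              · exact h
        have hcnt : (xs.dropWhile (· == x)).count k = (x :: xs).count k := by
          conv_rhs => rw [List.count_cons_of_ne (fun h => hk h.symm), hsplit]
          rw [List.count_append, List.count_eq_zero.mpr (fun h => hk (htake k h))]
          omega
        rw [PySem.Dict.getD_insert]
        simp [hk, hmem, hcnt]

-- map-then-filter over dedup = B's filterMap, given pointwise agreement of the counts
theorem pvEmit (keys : List String) (g : String → Int)
    (hg : ∀ k ∈ keys, g k = (keys.count k : Int)) :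
    ∀ (l : List String), (∀ k ∈ l, k ∈ keys) →
    ((l.map (fun k => (k, (keys.count k : Int)))).filter (fun p => 1 < p.2))
      = l.filterMap (fun k => if 1 < g k then some (k, g k) else none) := by
  intro l
  induction l with
  | nil => intro _; simp
  | cons x t ih =>
    intro hmem
    have hx : g x = (keys.count x : Int) := hg x (hmem x (by simp))
    rw [List.map_cons, List.filter_cons, List.filterMap_cons]
    by_cases h : 1 < (keys.count x : Int) <;>
      simp [h, hx, ih (fun k hk => hmem k (List.mem_cons_of_mem _ hk))]

-- the whole equivalence, as a function of the normalized key list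
theorem pvMain (ks : List String) :
    (ks.foldl (fun d k => if d.contains k then d.insert k (d.getD k 0 + 1) else d.insert k 1)
        PySem.Dict.empty).items.filter (fun p => 1 < p.2)
      = (PySem.List.dedup ks).filterMap (fun k =>
          if 1 < (pvRuns (PySem.List.sorted ks (fun x => x) false) PySem.Dict.empty).getD k 0
          then some (k, (pvRuns (PySem.List.sorted ks (fun x => x) false) PySem.Dict.empty).getD k 0)
          else none) := by
  rw [pvFoldA_eq_counter, PySem.Dict.items_counter, ← PySem.List.dedup_eq_ofList]
  have hperm : (PySem.List.sorted ks (fun x => x) false).Perm ks := PySem.List.sorted_perm ks _ _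
  have hg : ∀ k ∈ ks,
      (pvRuns (PySem.List.sorted ks (fun x => x) false) PySem.Dict.empty).getD k 0
        = (ks.count k : Int) := by
    intro k hk
    rw [pvRuns_getD (PySem.List.sorted ks (fun x => x) false).length _ le_rfl
      (by simpa using PySem.List.sorted_pairwise ks (fun x => x)),
      if_pos (hperm.mem_iff.mpr hk), hperm.count_eq]
  exact pvEmit ks _ hg (PySem.List.dedup ks) (fun k hk => (PySem.List.mem_dedup ks k).mp hk)

-- ===== VERDICT (by name: the statement is the Claim_ definition above) =====
theorem find_similar_queries_spec : Claim_equal_find_similar_queries := by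
  intro queries _ _
  unfold Spec_find_similar_queries find_similar_queries find_similar_queries_alt
  rw [← pvMain (queries.map (fun q => pvNormalize (((PySem.Dict.mk q).get? "sql").getD "")))]
  rw [List.foldl_map]
  rfl
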